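-- pv_equiv track=rewrite | github.com/nsimeyroneinc/NSITerm2024 | python/DS0011/Ex1.py | max_pile_ruben
-- ===== SOURCE A (Python) =====
-- def creer_pile_vide():
--     return []
--
-- def est_vide(P):
--     if P==[]:
--         return True
--     else:
--         return False
--
-- def empiler(P,x):
--     P.append(x)
--
-- def depiler(P):
--     if est_vide(P) == True :
--         raise IndexError("Vous avez essayé de dépiler une pile vide !")
--     else :
--         return P.pop()
--
-- def max_pile_ruben(P,i):
--     Q=creer_pile_vide()
--     position_maxi=1
--     x=depiler(P)
--     maxi=x
--     empiler(Q,x)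
--     position=1
--     while position_maxi<i:
--         position_maxi+=1
--         x=depiler(P)
--         empiler(Q,x)
--         if x>maxi:
--             position=position_maxi
--             maxi=x
--     while not est_vide(Q):
--         x=depiler(Q)
--         empiler(P,x)
--
--     return position
-- ===== SOURCE B (Python) =====
-- def max_pile_ruben(P, i):
--     n = i if i > 1 else 1
--     if len(P) < n:
--         raise IndexError("Vous avez essayé de dépiler une pile vide !")
--     maxi = P[-1]
--     pos = 1
--     for k in range(2, n + 1):
--         v = P[-k]
--         if v > maxi:
--             maxi = v
--             pos = k
--     return pos
-- ===== Notes on version B (the rewrite author's own statement) =====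
-- stated objective: simpler
-- what changed: Replaced A's destructive two-pass stack round trip (pop the top i elements onto an auxiliary stack, then pop them all back to restore P) by a single non-mutating indexed scan of the top max(i,1) elements via negative indexing, tracking the first strict maximum and its 1-based position from the top. (no auxiliary stack, no restore pass, no per-element pop/append).
import Mathlib
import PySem

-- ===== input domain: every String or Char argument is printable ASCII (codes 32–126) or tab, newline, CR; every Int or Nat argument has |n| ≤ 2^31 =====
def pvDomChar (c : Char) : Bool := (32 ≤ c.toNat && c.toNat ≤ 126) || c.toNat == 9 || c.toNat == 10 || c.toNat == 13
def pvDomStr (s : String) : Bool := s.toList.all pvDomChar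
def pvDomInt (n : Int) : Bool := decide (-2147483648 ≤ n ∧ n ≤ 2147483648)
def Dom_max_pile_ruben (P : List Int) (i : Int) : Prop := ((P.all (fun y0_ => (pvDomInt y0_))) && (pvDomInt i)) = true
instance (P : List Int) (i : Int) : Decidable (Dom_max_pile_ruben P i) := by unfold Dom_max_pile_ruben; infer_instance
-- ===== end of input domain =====

-- B replaces A's pop-everything-onto-an-auxiliary-stack-and-restore round trip by a single
-- non-mutating indexed scan of the top n elements (objective: simpler). Return-value equivalence:
-- A mutates P in place but fully restores it before returning, so callers see no net mutation.

-- ===== PORT A =====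
-- the second while loop of A: pop Q back onto P (restores P; result unused for the return value)
def mprRestore : List Int → List Int → List Int
  | [], P => P
  | q :: qs, P => mprRestore (q :: qs).dropLast (P ++ [(q :: qs).getLast?.getD 0])
termination_by Q _ => Q.length
decreasing_by simp

-- the first while loop of A; fuel = number of iterations (position_maxi increments by 1 each pass
-- toward i).  'depiler' of an empty pile raises in Python; Pre_ excludes those inputs, the
-- placeholder .getD 0 is never reached under Pre_.
def mprLoop : Nat → List Int → List Int → Int → Int → Int → List Int × List Int × Int
  | 0, P, Q, _pm, _maxi, pos => (P, Q, pos)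
  | f + 1, P, Q, pm, maxi, pos =>
      let pm' := pm + 1
      let x := P.getLast?.getD 0
      let P' := P.dropLast
      let Q' := Q ++ [x]
      if x > maxi then mprLoop f P' Q' pm' x pm'
      else mprLoop f P' Q' pm' maxi pos

def max_pile_ruben (P : List Int) (i : Int) : Int :=
  let Q : List Int := []
  let position_maxi : Int := 1
  let x := P.getLast?.getD 0          -- x = depiler(P); empty pile raises, excluded by Pre_
  let P1 := P.dropLast
  let maxi := x
  let Q1 := Q ++ [x]                  -- empiler(Q, x)
  let position : Int := 1
  let r := mprLoop (i - position_maxi).toNat P1 Q1 position_maxi maxi position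
  let _ := mprRestore r.2.1 r.1       -- restore P from Q (mutation only; no effect on the result)
  r.2.2

-- ===== PORT B =====
def max_pile_ruben_alt (P : List Int) (i : Int) : Int :=
  let n : Int := if i > 1 then i else 1
  -- Source B raises IndexError here when len(P) < n; Pre_ excludes exactly those inputs
  let maxi := (PySem.List.pyGet? P (-1)).getD 0
  let st := (PySem.List.pyRange 2 (n + 1) 1).foldl
      (fun (st : Int × Int) k =>
        let v := (PySem.List.pyGet? P (-k)).getD 0
        if v > st.1 then (v, k) else st) (maxi, 1)
  st.2

-- ===== PRECONDITION & SPEC =====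
-- Pre_ excludes exactly the inputs where Python A raises IndexError (fewer than max(i,1)
-- elements on the pile); B raises the same IndexError there.
def Pre_max_pile_ruben (P : List Int) (i : Int) : Prop :=
  (if i > 1 then i else 1) ≤ (P.length : Int)
instance (P : List Int) (i : Int) : Decidable (Pre_max_pile_ruben P i) := by
  unfold Pre_max_pile_ruben; infer_instance

def pvWitness_max_pile_ruben : List Int × Int := ([3, 1, 2], 3)

def Spec_max_pile_ruben (P : List Int) (i : Int) (out : Int) : Prop := out = max_pile_ruben_alt P i
instance (P : List Int) (i : Int) (out : Int) : Decidable (Spec_max_pile_ruben P i out) := by unfold Spec_max_pile_ruben; infer_instance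

-- ===== CLAIM (what is proved, stated in full; the proofs are below) =====
def Claim_equal_max_pile_ruben : Prop := ∀ (P : List Int) (i : Int), Dom_max_pile_ruben P i → Pre_max_pile_ruben P i → Spec_max_pile_ruben P i (max_pile_ruben P i)

-- ===== LEMMAS AND PROOFS =====

-- common reference: scan a list (the reversed pile segment) keeping the first strict maximum,
-- pm = 1-indexed position counter from the top
def mprScan : List Int → Int → Int → Int → Int
  | [], _pm, _maxi, pos => pos
  | x :: t, pm, maxi, pos =>
      if x > maxi then mprScan t (pm + 1) x (pm + 1) else mprScan t (pm + 1) maxi pos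

theorem mprLoop_eq_scan (f : Nat) :
    ∀ (L Q : List Int) (pm maxi pos : Int), f ≤ L.length →
      (mprLoop f L Q pm maxi pos).2.2 = mprScan (L.reverse.take f) pm maxi pos := by
  induction f with
  | zero => intro L Q pm maxi pos _; simp [mprLoop, mprScan]
  | succ f ih =>
    intro L Q pm maxi pos hf
    have hL : L ≠ [] := by intro h; subst h; simp at hf
    obtain ⟨x, t, hr⟩ : ∃ x t, L.reverse = x :: t := by
      cases hrev : L.reverse with
      | nil => exact absurd (by simpa using congrArg List.reverse hrev) hL
      | cons a b => exact ⟨a, b, rfl⟩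
    have hlast : L.getLast?.getD 0 = x := by
      rw [List.getLast?_eq_head?_reverse, hr]; rfl
    have hdrop : L.dropLast.reverse = t := by
      rw [← List.tail_reverse, hr]; rfl
    have hlen : f ≤ L.dropLast.length := by
      have := congrArg List.length hr
      simp at this
      simp [List.length_dropLast]; omega
    simp only [mprLoop, hlast, hr, List.take_succ_cons, mprScan]
    split_ifs with h
    · rw [ih _ _ _ _ _ hlen, hdrop]
    · rw [ih _ _ _ _ _ hlen, hdrop]

theorem mprFold_eq_scan (P : List Int) (n : Int) (hn : n ≤ (P.length : Int)) :
    ∀ (fc : Nat) (c maxi pos : Int), 1 ≤ c → fc = (n + 1 - c).toNat →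
      ((PySem.List.pyRange c (n + 1) 1).foldl
        (fun (st : Int × Int) k =>
          let v := (PySem.List.pyGet? P (-k)).getD 0
          if v > st.1 then (v, k) else st) (maxi, pos)).2
      = mprScan ((P.reverse.drop (c - 1).toNat).take (n + 1 - c).toNat) (c - 1) maxi pos := by
  intro fc
  induction fc with
  | zero =>
    intro c maxi pos hc hfc
    have hcb : n + 1 ≤ c := by omega
    rw [PySem.List.pyRange_one_eq_nil hcb]
    have : (n + 1 - c).toNat = 0 := by omega
    simp [this, mprScan]
  | succ f ih =>
    intro c maxi pos hc hfc
    have hcb : c < n + 1 := by omega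
    rw [PySem.List.pyRange_one_cons hcb]
    have hcP : c ≤ (P.length : Int) := by omega
    have hget : (PySem.List.pyGet? P (-c)).getD 0 = P.reverse.getD (c - 1).toNat 0 := by
      obtain ⟨k, hk⟩ : ∃ k : Nat, c = (k : Int) := ⟨c.toNat, by omega⟩
      rw [hk]
      have h1 : 0 < k := by omega
      have h2 : k ≤ P.length := by omega
      rw [PySem.List.pyGet?_neg_natCast _ _ (by exact_mod_cast h1) h2]
      have hk1 : (((k : Int)) - 1).toNat = k - 1 := by omega
      rw [hk1, List.getD_eq_getElem?_getD, List.getElem?_reverse (by omega)]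
      congr 2
      omega
    have hsplit : (P.reverse.drop (c - 1).toNat).take (n + 1 - c).toNat
        = P.reverse.getD (c - 1).toNat 0 :: ((P.reverse.drop c.toNat).take (n + 1 - (c + 1)).toNat) := by
      have h3 : (c - 1).toNat < P.length := by omega
      have h3' : (c - 1).toNat < P.reverse.length := by simpa using h3
      rw [List.getD_eq_getElem?_getD, List.getElem?_eq_getElem h3']
      rw [List.drop_eq_getElem_cons h3']
      have htk : (n + 1 - c).toNat = (n + 1 - (c + 1)).toNat + 1 := by omega
      have hsuc : (c - 1).toNat + 1 = c.toNat := by omega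
      rw [htk, List.take_succ_cons, hsuc]
      rfl
    rw [hsplit, ← hget]
    simp only [List.foldl_cons, mprScan]
    have harg : c - 1 + 1 = c := by ring
    have e1 : (c + 1 - 1).toNat = c.toNat := by omega
    split_ifs with h
    · rw [ih (c + 1) _ _ (by omega) (by omega), e1, harg]; norm_num
    · rw [ih (c + 1) _ _ (by omega) (by omega), e1, harg]; norm_num

-- ===== VERDICT (by name: the statement is the Claim_ definition above) =====
theorem max_pile_ruben_spec : Claim_equal_max_pile_ruben := by
  intro P i _hdom hpre
  unfold Pre_max_pile_ruben at hpre
  unfold Spec_max_pile_ruben max_pile_ruben max_pile_ruben_alt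
  have hP : P ≠ [] := by
    intro h; subst h; simp at hpre; split_ifs at hpre <;> omega
  have hPos : 1 ≤ (P.length : Int) := by
    split_ifs at hpre <;> omega
  set n : Int := if i > 1 then i else 1 with hn
  have hnP : n ≤ (P.length : Int) := hpre
  -- left side via mprLoop_eq_scan
  have hfuel : (i - 1).toNat ≤ P.dropLast.length := by
    simp [List.length_dropLast]
    by_cases h1 : i > 1
    · have : n = i := by simp [hn, h1]
      omega
    · omega
  rw [mprLoop_eq_scan _ _ _ _ _ _ hfuel]
  -- right side via mprFold_eq_scan
  simp only [PySem.List.pyGet?_neg_one]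
  rw [mprFold_eq_scan P n hnP (n + 1 - 2).toNat 2 _ _ (by omega) rfl]
  have h21 : ((2 : Int) - 1).toNat = 1 := by decide
  rw [h21]
  have hdrop : P.dropLast.reverse = P.reverse.drop 1 := by
    rw [← List.tail_reverse]; cases P.reverse <;> simp
  rw [hdrop]
  have htk : (i - 1).toNat = (n + 1 - 2).toNat := by
    by_cases h1 : i > 1
    · have hni : n = i := by simp [hn, h1]
      omega
    · have hn1 : n = 1 := by simp [hn, h1]
      omega
  rw [htk]
  norm_num
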